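-- pv_equiv track=rewrite | github.com/cmunozcortes/advent-of-code | 20191201/rocket_equation.py | calculate_fuel_for_fuel
-- ===== SOURCE A (Python) =====
-- def calculate_fuel(mass):
--     return (mass // 3) - 2
--
-- def calculate_fuel_for_fuel(fuel):
--     total_fuel_for_fuel = 0
--     while (fuel > 0):
--         fuel_for_fuel = calculate_fuel(fuel)
--         if (fuel_for_fuel < 0):
--             fuel_for_fuel = 0
--         total_fuel_for_fuel += fuel_for_fuel
--         fuel = fuel_for_fuel
--     return total_fuel_for_fuel
-- ===== SOURCE B (Python) =====
-- def calculate_fuel(mass):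
--     return (mass // 3) - 2
--
-- def calculate_fuel_for_fuel(fuel):
--     if fuel <= 0:
--         return 0
--     f = calculate_fuel(fuel)
--     if f < 0:
--         f = 0
--     return f + calculate_fuel_for_fuel(f)
-- ===== Notes on version B (the rewrite author's own statement) =====
-- stated objective: idiomatic
-- what changed: Replaces the while-loop with a running accumulator by direct recursion over the shrinking fuel value, summing each stage's (clamped) fuel requirement.
import Mathlib
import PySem

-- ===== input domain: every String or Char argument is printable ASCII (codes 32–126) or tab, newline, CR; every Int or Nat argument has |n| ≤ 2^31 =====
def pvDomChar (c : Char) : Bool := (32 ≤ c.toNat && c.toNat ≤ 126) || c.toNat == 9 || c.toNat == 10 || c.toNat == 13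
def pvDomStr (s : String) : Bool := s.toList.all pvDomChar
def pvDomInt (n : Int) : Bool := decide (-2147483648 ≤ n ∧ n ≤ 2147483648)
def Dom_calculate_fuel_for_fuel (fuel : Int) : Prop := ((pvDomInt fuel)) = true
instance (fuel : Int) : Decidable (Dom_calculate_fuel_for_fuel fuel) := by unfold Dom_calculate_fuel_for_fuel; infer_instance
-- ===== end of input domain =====

-- B replaces A's while-loop with an accumulator by direct recursion over the shrinking fuel value (idiomatic form).


-- ===== PORT A =====
def calculate_fuel (mass : Int) : Int := PySem.Int.floordiv mass 3 - 2

-- termination helper for A's while loop: the (clamped) next fuel is smaller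
theorem pvNextLt (fuel : Int) (h : 0 < fuel) :
    (if calculate_fuel fuel < 0 then 0 else calculate_fuel fuel).toNat < fuel.toNat := by
  have e : PySem.Int.floordiv fuel 3 = fuel / 3 :=
    PySem.Int.floordiv_eq_ediv_of_pos (by norm_num)
  unfold calculate_fuel
  rw [e]
  split <;> omega

-- while (fuel > 0): … accumulate into total_fuel_for_fuel
def calcLoopA (fuel total_fuel_for_fuel : Int) : Int :=
  if h : fuel > 0 then
    let fuel_for_fuel := calculate_fuel fuel
    let fuel_for_fuel := if fuel_for_fuel < 0 then 0 else fuel_for_fuel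
    calcLoopA fuel_for_fuel (total_fuel_for_fuel + fuel_for_fuel)
  else total_fuel_for_fuel
termination_by fuel.toNat
decreasing_by exact pvNextLt fuel h

def calculate_fuel_for_fuel (fuel : Int) : Int := calcLoopA fuel 0

-- ===== PORT B =====
def calculate_fuel_for_fuel_alt (fuel : Int) : Int :=
  if h : fuel ≤ 0 then 0
  else
    let f := calculate_fuel fuel
    let f := if f < 0 then 0 else f
    f + calculate_fuel_for_fuel_alt f
termination_by fuel.toNat
decreasing_by exact pvNextLt fuel (by omega)

-- ===== PRECONDITION & SPEC =====
def Spec_calculate_fuel_for_fuel (fuel : Int) (out : Int) : Prop := out = calculate_fuel_for_fuel_alt fuel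
instance (fuel : Int) (out : Int) : Decidable (Spec_calculate_fuel_for_fuel fuel out) := by unfold Spec_calculate_fuel_for_fuel; infer_instance

-- ===== CLAIM (what is proved, stated in full; the proofs are below) =====
def Claim_equal_calculate_fuel_for_fuel : Prop := ∀ (fuel : Int), Dom_calculate_fuel_for_fuel fuel → Spec_calculate_fuel_for_fuel fuel (calculate_fuel_for_fuel fuel)

-- ===== LEMMAS AND PROOFS =====
-- loop invariant: the accumulator just adds to the recursive total
theorem calcLoopA_eq (fuel total : Int) :
    calcLoopA fuel total = total + calculate_fuel_for_fuel_alt fuel := by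
  induction fuel, total using calcLoopA.induct with
  | case1 fuel total h f g ih =>
    rw [calcLoopA, calculate_fuel_for_fuel_alt]
    simp only [h, dite_true, dif_neg (by omega : ¬ fuel ≤ 0)]
    simp only [f, g, dite_eq_ite] at ih
    rw [ih]; ring
  | case2 fuel total h =>
    rw [calcLoopA, calculate_fuel_for_fuel_alt]
    simp only [h, dite_false, dif_pos (by omega : fuel ≤ 0)]
    ring

-- ===== VERDICT (by name: the statement is the Claim_ definition above) =====
theorem calculate_fuel_for_fuel_spec : Claim_equal_calculate_fuel_for_fuel := by
  intro fuel _
  unfold Spec_calculate_fuel_for_fuel calculate_fuel_for_fuel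
  rw [calcLoopA_eq]; ring
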